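-- pv_equiv track=rewrite | github.com/Carlbern/flashcards | modules/formatting.py | printCardBorder
-- ===== SOURCE A (Python) =====
-- def printCardBorder(word):
--     asterisks = ""
--     i = 0
--     while i < len(word) + 6:
--         if i == 0 or i == (len(word) + 5):
--             asterisks+=" "
--         else:
--             asterisks+="*"
--         i+=1
--     return asterisks
-- ===== SOURCE B (Python) =====
-- def printCardBorder(word):
--     return " " + "*" * (len(word) + 4) + " "
-- ===== Notes on version B (the rewrite author's own statement) =====
-- stated objective: simpler
-- what changed: Replaces the index loop with endpoint branching by a closed-form concatenation: one space, len(word)+4 asterisks via string multiplication, one space.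
import Mathlib
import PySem

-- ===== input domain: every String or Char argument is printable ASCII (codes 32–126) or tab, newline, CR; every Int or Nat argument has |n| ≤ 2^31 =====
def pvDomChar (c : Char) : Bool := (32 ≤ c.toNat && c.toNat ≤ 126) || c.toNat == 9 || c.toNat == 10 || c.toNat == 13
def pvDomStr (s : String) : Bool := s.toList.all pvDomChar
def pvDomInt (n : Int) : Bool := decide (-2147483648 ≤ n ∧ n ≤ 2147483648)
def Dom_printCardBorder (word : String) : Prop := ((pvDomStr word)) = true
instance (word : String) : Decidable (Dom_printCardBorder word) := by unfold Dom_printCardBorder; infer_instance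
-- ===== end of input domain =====

-- B replaces A's per-index loop (branching on first/last position) by the closed form
-- " " ++ (len+4) asterisks ++ " "; equivalence of return values is proved for all inputs.

-- ===== PORT A =====
-- while i < len(word)+6: append " " at i = 0 and i = len+5, else "*"
def printCardBorder (word : String) : String :=
  String.ofList ((List.range (word.toList.length + 6)).foldl
    (fun acc i => acc ++ [if i = 0 ∨ i = word.toList.length + 5 then ' ' else '*']) [])

-- ===== PORT B =====
-- " " + "*" * (len(word) + 4) + " "
def printCardBorder_alt (word : String) : String :=
  String.ofList ([' '] ++ List.replicate (word.toList.length + 4) '*' ++ [' '])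

-- ===== PRECONDITION & SPEC =====
def Spec_printCardBorder (word : String) (out : String) : Prop := out = printCardBorder_alt word
instance (word : String) (out : String) : Decidable (Spec_printCardBorder word out) := by unfold Spec_printCardBorder; infer_instance

-- ===== CLAIM (what is proved, stated in full; the proofs are below) =====
def Claim_equal_printCardBorder : Prop := ∀ (word : String), Dom_printCardBorder word → Spec_printCardBorder word (printCardBorder word)

-- ===== LEMMAS AND PROOFS =====
theorem pv_border_chars (n : Nat) :
    (List.range (n + 6)).map (fun i => if i = 0 ∨ i = n + 5 then ' ' else '*')
      = [' '] ++ List.replicate (n + 4) '*' ++ [' '] := by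
  rw [show List.range (n + 6) = List.range (n + 5) ++ [n + 5] from List.range_succ,
      List.map_append,
      show List.range (n + 5) = 0 :: (List.range (n + 4)).map Nat.succ from
        List.range_succ_eq_map,
      List.map_cons, List.map_map]
  simp only [List.map_singleton]
  have hmid : (List.range (n + 4)).map
      ((fun i => if i = 0 ∨ i = n + 5 then ' ' else '*') ∘ Nat.succ)
        = List.replicate (n + 4) '*' := by
    rw [List.eq_replicate_iff]
    constructor
    · simp
    · intro c hc
      rcases List.mem_map.mp hc with ⟨j, hj, hcj⟩
      have hjlt : j < n + 4 := List.mem_range.mp hj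
      have hne : ¬ (j.succ = 0 ∨ j.succ = n + 5) := by omega
      rw [← hcj]
      simp only [Function.comp_apply, if_neg hne]
  rw [hmid]
  simp

-- ===== VERDICT (by name: the statement is the Claim_ definition above) =====
theorem printCardBorder_spec : Claim_equal_printCardBorder := by
  intro word _
  unfold Spec_printCardBorder printCardBorder printCardBorder_alt
  rw [PySem.List.foldl_append_singleton_eq_map]
  rw [List.nil_append, pv_border_chars]
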